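-- pv_equiv track=rewrite | github.com/sgsgsg09/KSG_BACKJUN | python/BACKJUN/CLASS_1/2577.py | multi_sum
-- ===== SOURCE A (Python) =====
-- def multi_sum(arg):
--     n = 1
--     for i in arg:
--         n *= i
--     lis = list(str(n))
--     lis_t = {}
--     for i_t in range(10):
--         lis_t[i_t] = 0
--     for i in lis:
--         lis_t[int(i)] += 1
--
--     return lis_t
-- ===== SOURCE B (Python) =====
-- def multi_sum(arg):
--     n = 1
--     for x in arg:
--         n *= x
--     cnt = [0] * 10
--     if n == 0:
--         cnt[0] = 1
--     else:
--         while n: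
--             n, d = divmod(n, 10)
--             cnt[d] += 1
--     return {d: cnt[d] for d in range(10)}
-- ===== Notes on version B (the rewrite author's own statement) =====
-- stated objective: alternative
-- what changed: B never converts the product to a string: it extracts the digits arithmetically with a divmod loop into a 10-slot counter array, whereas A builds str(n) and tallies its characters through a dict.
import Mathlib
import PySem

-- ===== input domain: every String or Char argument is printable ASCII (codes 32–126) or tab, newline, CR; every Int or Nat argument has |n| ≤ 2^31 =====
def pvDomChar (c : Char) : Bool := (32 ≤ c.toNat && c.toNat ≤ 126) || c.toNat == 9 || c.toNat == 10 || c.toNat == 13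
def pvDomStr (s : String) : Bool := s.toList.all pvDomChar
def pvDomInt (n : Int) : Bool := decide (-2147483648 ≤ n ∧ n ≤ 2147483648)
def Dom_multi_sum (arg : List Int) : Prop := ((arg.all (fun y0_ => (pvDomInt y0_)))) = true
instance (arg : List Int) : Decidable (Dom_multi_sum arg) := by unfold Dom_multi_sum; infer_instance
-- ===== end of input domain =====

-- B never converts the product to a string: it extracts digits arithmetically with a divmod loop
-- into a 10-slot counter list, instead of A's str(n) + dict tally (alternative algorithm, same cost).


-- ===== PORT A =====
-- n = 1; for i in arg: n *= i; lis = list(str(n)); dict zero-init over range(10); one pass over lis.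
-- 'lis_t[int(i)] += 1' is ported as Dict.modify with default 0: under Pre_ the key int(i) is always
-- present (keys 0..9 were all inserted and every character is a digit), so the default is never used;
-- int(i) on the sign character '-' (ofChars? = none, Python ValueError) is excluded by Pre_.
def multi_sum (arg : List Int) : List (Int × Int) :=
  let n := arg.foldl (fun a i => a * i) 1
  let lis := PySem.Int.toChars n
  let d0 := (PySem.List.pyRange 0 10 1).foldl (fun d i_t => d.insert i_t (0 : Int)) PySem.Dict.empty
  let dfin := lis.foldl (fun d i =>
      match PySem.Int.ofChars? [i] with
      | some k => d.modify k 0 (fun x => x + 1)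
      | none => d) d0
  dfin.items

-- ===== PORT B =====
-- cnt[d] += 1 : d = n % 10 lies in [0, 10) whenever the loop runs (divisor 10 > 0), so plain
-- list indexing at d.toNat is exact.
def pvBump (cnt : List Int) (d : Int) : List Int :=
  cnt.set d.toNat (cnt.getD d.toNat 0 + 1)

-- 'while n: n, d = divmod(n, 10); cnt[d] += 1'. The guard is written 0 < n: identical to Python's
-- n ≠ 0 for the n ≥ 0 admitted by Pre_; on n < 0 the Python loop never terminates (excluded by Pre_).
def pvGo (n : Int) (cnt : List Int) : List Int :=
  if _h : 0 < n then
    pvGo (PySem.Int.floordiv n 10) (pvBump cnt (PySem.Int.mod n 10))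
  else cnt
termination_by n.toNat
decreasing_by
  simp only [PySem.Int.floordiv_eq_ediv_of_pos (by norm_num : (0:Int) < 10)]
  omega

-- n = product loop; cnt = [0]*10; if n == 0: cnt[0] = 1 else divmod loop; {d: cnt[d] for d in range(10)}.
def multi_sum_alt (arg : List Int) : List (Int × Int) :=
  let n := arg.foldl (fun a x => a * x) 1
  let cnt : List Int := List.replicate 10 0
  let cnt2 := if n = 0 then cnt.set 0 1 else pvGo n cnt
  (PySem.List.pyRange 0 10 1).map (fun d => (d, cnt2.getD d.toNat 0))

-- ===== PRECONDITION & SPEC =====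
-- Pre_ excludes exactly the inputs whose product is negative: there str(n) starts with '-' and A's
-- int(i) raises ValueError on the sign character (B's divmod loop does not terminate there either).
-- A returns on every other input.
def Pre_multi_sum (arg : List Int) : Prop := 0 ≤ arg.prod
instance (arg : List Int) : Decidable (Pre_multi_sum arg) := by unfold Pre_multi_sum; infer_instance
def pvWitness_multi_sum : List Int := [2, 3]

def Spec_multi_sum (arg : List Int) (out : List (Int × Int)) : Prop := out = multi_sum_alt arg
instance (arg : List Int) (out : List (Int × Int)) : Decidable (Spec_multi_sum arg out) := by unfold Spec_multi_sum; infer_instance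

-- ===== CLAIM (what is proved, stated in full; the proofs are below) =====
def Claim_equal_multi_sum : Prop := ∀ (arg : List Int), Dom_multi_sum arg → Pre_multi_sum arg → Spec_multi_sum arg (multi_sum arg)

-- ===== LEMMAS AND PROOFS =====

def pvDigits : List Char := ['0', '1', '2', '3', '4', '5', '6', '7', '8', '9']
def pvV (c : Char) : Int := (c.toNat : Int) - 48

theorem pv_toDigitsCore_mem (fuel : Nat) : ∀ (m : Nat) (ds : List Char),
    (∀ c ∈ ds, c ∈ pvDigits) → ∀ c ∈ Nat.toDigitsCore 10 fuel m ds, c ∈ pvDigits := by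
  induction fuel with
  | zero =>
    intro m ds h c hc
    simpa [Nat.toDigitsCore] using h c (by simpa [Nat.toDigitsCore] using hc)
  | succ f ih =>
    intro m ds h c hc
    have hdig : Nat.digitChar (m % 10) ∈ pvDigits := by
      have h10 : m % 10 < 10 := Nat.mod_lt _ (by omega)
      interval_cases h' : m % 10 <;> decide
    have hstep : Nat.toDigitsCore 10 (f + 1) m ds =
        if m / 10 = 0 then Nat.digitChar (m % 10) :: ds
        else Nat.toDigitsCore 10 f (m / 10) (Nat.digitChar (m % 10) :: ds) := by
      simp [Nat.toDigitsCore]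
    rw [hstep] at hc
    split at hc
    · rcases List.mem_cons.mp hc with h1 | h1
      · exact h1 ▸ hdig
      · exact h c h1
    · refine ih (m / 10) (Nat.digitChar (m % 10) :: ds) ?_ c hc
      intro c' hc'
      rcases List.mem_cons.mp hc' with h1 | h1
      · exact h1 ▸ hdig
      · exact h c' h1

theorem pv_toChars_digits (n : Int) (hn : 0 ≤ n) : ∀ c ∈ PySem.Int.toChars n, c ∈ pvDigits := by
  intro c hc
  rw [PySem.Int.toChars, if_neg (by omega)] at hc
  exact pv_toDigitsCore_mem (n.toNat + 1) n.toNat [] (by simp) c hc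

theorem pv_ofChars_digit : ∀ c ∈ pvDigits, PySem.Int.ofChars? [c] = some (pvV c) := by
  intro c hc; fin_cases hc <;> decide

theorem pv_v_mem : ∀ c ∈ pvDigits, pvV c ∈ PySem.List.pyRange 0 10 1 := by
  intro c hc; fin_cases hc <;> decide

-- A's digit loop, once every character is known to be a digit, is the counter fold over the digit values.
theorem pv_fold_eq (l : List Char) (hl : ∀ c ∈ l, c ∈ pvDigits) (d : PySem.Dict Int Int) :
    l.foldl (fun d i =>
      match PySem.Int.ofChars? [i] with
      | some k => d.modify k 0 (fun x => x + 1)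
      | none => d) d
    = (l.map pvV).foldl (fun d k => d.modify k 0 (fun x => x + 1)) d := by
  induction l generalizing d with
  | nil => rfl
  | cons c t ih =>
    have hc : PySem.Int.ofChars? [c] = some (pvV c) := pv_ofChars_digit c (hl c (by simp))
    simp only [List.foldl, List.map, hc]
    exact ih (fun c' h' => hl c' (by simp [h'])) _

-- toDigitsCore is Nat.digits written most-significant first.
theorem pv_toDigitsCore_eq (fuel : Nat) : ∀ (m : Nat) (ds : List Char), m < fuel → 0 < m →
    Nat.toDigitsCore 10 fuel m ds = ((Nat.digits 10 m).map Nat.digitChar).reverse ++ ds := by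
  induction fuel with
  | zero => intro m ds h _; omega
  | succ f ih =>
    intro m ds hfuel hm
    have hstep : Nat.toDigitsCore 10 (f + 1) m ds =
        if m / 10 = 0 then Nat.digitChar (m % 10) :: ds
        else Nat.toDigitsCore 10 f (m / 10) (Nat.digitChar (m % 10) :: ds) := by
      simp [Nat.toDigitsCore]
    have hdig : Nat.digits 10 m = m % 10 :: Nat.digits 10 (m / 10) :=
      Nat.digits_def' (by norm_num) hm
    rw [hstep]
    by_cases hq : m / 10 = 0
    · have : Nat.digits 10 (m / 10) = [] := by rw [hq]; simp
      rw [if_pos hq, hdig, this]; simp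
    · have hq' : 0 < m / 10 := Nat.pos_of_ne_zero hq
      have hlt : m / 10 < f := by
        have := Nat.div_lt_self hm (by norm_num : 1 < 10)
        omega
      rw [if_neg hq, ih (m / 10) _ hlt hq', hdig]
      simp

theorem pv_toChars_eq (n : Int) (hn : 0 < n) :
    PySem.Int.toChars n = ((Nat.digits 10 n.toNat).map Nat.digitChar).reverse := by
  rw [PySem.Int.toChars, if_neg (by omega)]
  have := pv_toDigitsCore_eq (n.toNat + 1) n.toNat [] (by omega) (by omega)
  simpa using this

theorem pv_v_digitChar (d : Nat) (hd : d < 10) : pvV (Nat.digitChar d) = (d : Int) := by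
  interval_cases d <;> decide

-- the character multiset of str(n) carries exactly the numeric digits of n
theorem pv_count_chars (n : Int) (hn : 0 < n) (j : Nat) :
    ((PySem.Int.toChars n).map pvV).count ((j : Nat) : Int) = (Nat.digits 10 n.toNat).count j := by
  rw [pv_toChars_eq n hn, List.map_reverse, List.count_reverse, List.map_map]
  have hmap : (Nat.digits 10 n.toNat).map (pvV ∘ Nat.digitChar)
      = (Nat.digits 10 n.toNat).map (fun d => Int.ofNat d) := by
    apply List.map_congr_left
    intro d hd
    simpa using pv_v_digitChar d (Nat.digits_lt_base (by norm_num) hd)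
  rw [hmap]
  have hcnt := List.count_map_of_injective (x := j) (Nat.digits 10 n.toNat)
    (fun d => Int.ofNat d) (fun a b h => Int.ofNat.inj h)
  simpa using hcnt

theorem pv_bump_length (cnt : List Int) (d : Int) : (pvBump cnt d).length = cnt.length := by
  simp [pvBump]

theorem pv_bump_getD (cnt : List Int) (d : Int) (hlen : cnt.length = 10)
    (_hd0 : 0 ≤ d) (_hd : d < 10) (j : Nat) (hj : j < 10) :
    (pvBump cnt d).getD j 0 = cnt.getD j 0 + (if d.toNat = j then 1 else 0) := by
  unfold pvBump
  by_cases h : d.toNat = j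
  · subst h
    rw [if_pos rfl]
    simp [List.getD, hlen, show d.toNat < 10 by omega]
  · rw [if_neg h]
    simp [List.getD, h]

-- B's divmod loop counts each digit value of n into its slot.
theorem pv_go_getD (n : Int) (cnt : List Int) (hn : 0 ≤ n) (hlen : cnt.length = 10)
    (j : Nat) (hj : j < 10) :
    (pvGo n cnt).getD j 0 = cnt.getD j 0 + ((Nat.digits 10 n.toNat).count j : Int) := by
  by_cases h : 0 < n
  · rw [pvGo, dif_pos h]
    have h10 : (0:Int) < 10 := by norm_num
    have hfd : PySem.Int.floordiv n 10 = n / 10 := PySem.Int.floordiv_eq_ediv_of_pos h10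
    have hmd : PySem.Int.mod n 10 = n % 10 := PySem.Int.mod_eq_emod_of_pos h10
    have hq0 : 0 ≤ n / 10 := by omega
    have hlen' : (pvBump cnt (PySem.Int.mod n 10)).length = 10 := by
      rw [pv_bump_length]; exact hlen
    have ih := pv_go_getD (PySem.Int.floordiv n 10) (pvBump cnt (PySem.Int.mod n 10))
      (by rw [hfd]; omega) hlen' j hj
    rw [ih, pv_bump_getD cnt _ hlen (by rw [hmd]; omega) (by rw [hmd]; omega) j hj]
    have hdig : Nat.digits 10 n.toNat = n.toNat % 10 :: Nat.digits 10 (n.toNat / 10) :=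
      Nat.digits_def' (by norm_num) (by omega)
    have hqn : (PySem.Int.floordiv n 10).toNat = n.toNat / 10 := by rw [hfd]; omega
    have hmn : (PySem.Int.mod n 10).toNat = n.toNat % 10 := by rw [hmd]; omega
    rw [hqn, hmn, hdig, List.count_cons]
    by_cases hc : n.toNat % 10 = j
    · simp [hc]; omega
    · simp [hc]
  · have hn0 : n = 0 := by omega
    rw [pvGo, dif_neg h, hn0]
    simp
termination_by n.toNat
decreasing_by
  simp only [PySem.Int.floordiv_eq_ediv_of_pos (by norm_num : (0:Int) < 10)]
  omega

-- per-key agreement: A's tally of str(n) equals B's counter slot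
theorem pv_key_val (n : Int) (hn : 0 ≤ n) (j : Nat) (hj : j < 10) :
    ((((PySem.Int.toChars n).map pvV).count ((j : Nat) : Int) : Nat) : Int)
      = (if n = 0 then (List.replicate 10 (0:Int)).set 0 1 else pvGo n (List.replicate 10 0)).getD j 0 := by
  by_cases h0 : n = 0
  · subst h0
    rw [if_pos rfl]
    interval_cases j <;> decide
  · rw [if_neg h0,
        pv_go_getD n (List.replicate 10 0) hn (by simp) j hj,
        pv_count_chars n (by omega) j]
    simp
    interval_cases j <;> rfl

-- ===== VERDICT (by name: the statement is the Claim_ definition above) =====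
theorem multi_sum_spec : Claim_equal_multi_sum := by
  intro arg _ hpre
  unfold Spec_multi_sum multi_sum multi_sum_alt
  dsimp only
  have hn : 0 ≤ arg.foldl (fun a i => a * i) 1 := by
    have hp : arg.prod = arg.foldl (fun a i => a * i) 1 := List.prod_eq_foldl
    rw [← hp]; exact hpre
  set n := arg.foldl (fun a i => a * i) 1 with hndef
  set l := PySem.Int.toChars n with hldef
  have hl : ∀ c ∈ l, c ∈ pvDigits := pv_toChars_digits _ hn
  rw [pv_fold_eq l hl _]
  set d0 := (PySem.List.pyRange 0 10 1).foldl (fun d i_t => d.insert i_t (0 : Int)) PySem.Dict.empty with hd0def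
  set ks := l.map pvV with hksdef
  have hkeys : (ks.foldl (fun d k => d.modify k 0 (fun x => x + 1)) d0).keys = d0.keys := by
    rw [PySem.Dict.keys_foldl_modify ks 0 (fun _ _ => fun x => x + 1) d0,
        PySem.Set.update_eq_append_filter]
    have hd0keys : d0.keys = PySem.List.pyRange 0 10 1 := by decide
    have : (PySem.Set.ofList ks).filter (fun y => !PySem.Set.contains d0.keys y) = [] := by
      rw [List.filter_eq_nil_iff]
      intro k hk
      have hk' : k ∈ ks := (PySem.Set.mem_ofList ks k).mp hk
      rcases List.mem_map.1 hk' with ⟨c, hc, rfl⟩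
      have : pvV c ∈ d0.keys := hd0keys ▸ pv_v_mem c (hl c hc)
      simp [PySem.Set.contains_eq_listContains, this]
    rw [this, List.append_nil]
  have hd0keys : d0.keys = PySem.List.pyRange 0 10 1 := by decide
  have hnodup : (ks.foldl (fun d k => d.modify k 0 (fun x => x + 1)) d0).keys.Nodup := by
    rw [hkeys, hd0keys]; decide
  rw [PySem.Dict.items_eq_map_keys _ hnodup 0, hkeys, hd0keys]
  apply List.map_congr_left
  intro k hk
  rw [PySem.Dict.getD_foldl_modify_add_one]
  have hgetD : d0.getD k 0 = 0 := by
    fin_cases hk <;> (rw [hd0def]; decide)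
  rw [hgetD, zero_add, hksdef]
  fin_cases hk
  · exact (by simpa using pv_key_val n hn 0 (by norm_num))
  · exact (by simpa using pv_key_val n hn 1 (by norm_num))
  · exact (by simpa using pv_key_val n hn 2 (by norm_num))
  · exact (by simpa using pv_key_val n hn 3 (by norm_num))
  · exact (by simpa using pv_key_val n hn 4 (by norm_num))
  · exact (by simpa using pv_key_val n hn 5 (by norm_num))
  · exact (by simpa using pv_key_val n hn 6 (by norm_num))
  · exact (by simpa using pv_key_val n hn 7 (by norm_num))
  · exact (by simpa using pv_key_val n hn 8 (by norm_num))
  · exact (by simpa using pv_key_val n hn 9 (by norm_num))
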